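-- pv_equiv track=rewrite | github.com/hw233/GameServer-Python | logic/role/defines.py | transToShapePartListForRide
-- ===== SOURCE A (Python) =====
-- shapePartTypeCount = 7 # 造型部位数
--
-- def transToShapePartListForRide(shapeParts):
-- 	'''坐骑造型部位转换成列表，用于发协议
-- 	'''
-- 	lst = []
-- 	for shapePartType in range(0, shapePartTypeCount):
-- 		if shapePartType in shapeParts:
-- 			v = shapeParts[shapePartType]
-- 		elif shapePartType < 5:
-- 			v = 1
-- 		else:
-- 			v = 0
-- 		lst.append(v)
--
-- 	return lst
-- ===== SOURCE B (Python) =====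
-- shapePartTypeCount = 7 # 造型部位数
--
-- def transToShapePartListForRide(shapeParts):
--     '''坐骑造型部位转换成列表，用于发协议
--     '''
--     lst = [1, 1, 1, 1, 1, 0, 0]
--     for k, v in shapeParts.items():
--         if 0 <= k < shapePartTypeCount:
--             lst[k] = v
--     return lst
-- ===== Notes on version B (the rewrite author's own statement) =====
-- stated objective: simpler
-- what changed: Instead of scanning the 7 fixed indices and looking each one up in the dict, B seeds a table of the per-index defaults and patches it in place from the dict's own entries, ignoring out-of-range keys.
import Mathlib
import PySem

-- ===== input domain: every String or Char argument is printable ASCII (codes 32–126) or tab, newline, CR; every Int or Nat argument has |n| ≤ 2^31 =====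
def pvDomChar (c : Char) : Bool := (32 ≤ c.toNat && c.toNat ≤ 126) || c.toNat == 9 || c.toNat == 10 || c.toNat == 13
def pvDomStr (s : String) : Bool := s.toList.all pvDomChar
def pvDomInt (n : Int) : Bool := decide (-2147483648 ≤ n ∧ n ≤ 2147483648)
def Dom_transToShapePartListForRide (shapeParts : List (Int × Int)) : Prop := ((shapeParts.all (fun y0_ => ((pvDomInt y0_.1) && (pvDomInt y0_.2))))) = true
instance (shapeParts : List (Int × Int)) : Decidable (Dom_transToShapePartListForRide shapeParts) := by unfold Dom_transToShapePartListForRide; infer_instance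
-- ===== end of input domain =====

-- B replaces A's scan of the 7 fixed indices (each with a dict lookup) by a seeded
-- defaults table patched in place from the dict's own entries (objective: simpler).

-- ===== PORT A =====
-- shapeParts is a Python dict (Int keys); membership/lookup = first match in the assoc list.
def transToShapePartListForRide (shapeParts : List (Int × Int)) : List Int :=
  (PySem.List.pyRange 0 7 1).foldl
    (fun lst t =>
      lst ++ [match shapeParts.find? (fun kv => kv.1 == t) with
              | some kv => kv.2
              | none => if t < 5 then 1 else 0]) []

-- ===== PORT B =====
def transToShapePartListForRide_alt (shapeParts : List (Int × Int)) : List Int :=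
  shapeParts.foldl
    (fun lst kv => if 0 ≤ kv.1 ∧ kv.1 < 7 then lst.set kv.1.toNat kv.2 else lst)
    [1, 1, 1, 1, 1, 0, 0]

-- ===== PRECONDITION & SPEC =====
-- The assoc list stands for a Python dict, whose keys are necessarily distinct; on a
-- duplicate-keyed list (which corresponds to no dict input of A) A's first-match lookup
-- and B's in-order overwriting would disagree, so such lists are excluded.
def Pre_transToShapePartListForRide (shapeParts : List (Int × Int)) : Prop :=
  (shapeParts.map Prod.fst).Nodup
instance (shapeParts : List (Int × Int)) : Decidable (Pre_transToShapePartListForRide shapeParts) := by unfold Pre_transToShapePartListForRide; infer_instance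
def pvWitness_transToShapePartListForRide : (List (Int × Int)) := [(0, 3), (5, 2), (8, 9)]

def Spec_transToShapePartListForRide (shapeParts : List (Int × Int)) (out : List Int) : Prop := out = transToShapePartListForRide_alt shapeParts
instance (shapeParts : List (Int × Int)) (out : List Int) : Decidable (Spec_transToShapePartListForRide shapeParts out) := by unfold Spec_transToShapePartListForRide; infer_instance

-- ===== CLAIM (what is proved, stated in full; the proofs are below) =====
def Claim_equal_transToShapePartListForRide : Prop := ∀ (shapeParts : List (Int × Int)), Dom_transToShapePartListForRide shapeParts → Pre_transToShapePartListForRide shapeParts → Spec_transToShapePartListForRide shapeParts (transToShapePartListForRide shapeParts)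

-- ===== LEMMAS AND PROOFS =====

def pvPatch (lst : List Int) (kv : Int × Int) : List Int :=
  if 0 ≤ kv.1 ∧ kv.1 < 7 then lst.set kv.1.toNat kv.2 else lst

lemma pvPatch_length (lst : List Int) (kv : Int × Int) :
    (pvPatch lst kv).length = lst.length := by
  unfold pvPatch; split <;> simp

lemma pvFoldl_patch_length (l : List (Int × Int)) (init : List Int) :
    (l.foldl pvPatch init).length = init.length := by
  induction l generalizing init with
  | nil => rfl
  | cons kv rest ih => simp [List.foldl_cons, ih, pvPatch_length]

lemma pvFind?_eq_none_of_not_mem (l : List (Int × Int)) (i : Int)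
    (h : i ∉ l.map Prod.fst) : l.find? (fun kv => kv.1 == i) = none := by
  rw [List.find?_eq_none]
  intro kv hkv
  simp only [beq_iff_eq]
  intro hEq
  exact h (List.mem_map.mpr ⟨kv, hkv, hEq⟩)

lemma pvFoldl_patch_getElem (l : List (Int × Int)) (init : List Int)
    (hnd : (l.map Prod.fst).Nodup) (hlen : init.length = 7) (i : ℕ) (hi : i < 7) :
    (l.foldl pvPatch init)[i]? =
      some (match l.find? (fun kv => kv.1 == (i : Int)) with
            | some kv => kv.2
            | none => init[i]!) := by
  induction l generalizing init with
  | nil =>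
      simp only [List.foldl_nil, List.find?_nil]
      rw [List.getElem?_eq_getElem (by omega)]
      rw [getElem!_pos _ _ (by omega)]
  | cons kv rest ih =>
      obtain ⟨k, v⟩ := kv
      simp only [List.map_cons, List.nodup_cons] at hnd
      obtain ⟨hk, hndr⟩ := hnd
      simp only [List.foldl_cons, List.find?_cons]
      by_cases hki : k = (i : Int)
      · subst hki
        simp only [beq_self_eq_true]
        have hfind : rest.find? (fun kv => kv.1 == ((i : ℕ) : Int)) = none :=
          pvFind?_eq_none_of_not_mem rest _ hk
        rw [ih (pvPatch init (((i : ℕ) : Int), v)) hndr (by rw [pvPatch_length]; exact hlen)]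
        rw [hfind]
        have hp : pvPatch init (((i : ℕ) : Int), v) = init.set ((i : ℕ) : Int).toNat v := by
          unfold pvPatch
          rw [if_pos (show (0:Int) ≤ ((i:ℕ):Int) ∧ ((i:ℕ):Int) < 7 from ⟨Int.natCast_nonneg i, by exact_mod_cast hi⟩)]
        rw [hp, Int.toNat_natCast]
        rw [getElem!_pos _ _ (by simp; omega)]
        simp [List.getElem_set_self]
      · have hne : (k == (i : Int)) = false := by simp [hki]
        rw [hne]
        rw [ih (pvPatch init (k, v)) hndr (by rw [pvPatch_length]; exact hlen)]
        have hsame : (pvPatch init (k, v))[i]! = init[i]! := by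
          unfold pvPatch
          split
          · rename_i hkr
            have hkn : k.toNat ≠ i := by omega
            rw [getElem!_pos _ _ (by simp; omega),
                getElem!_pos _ _ (by omega)]
            exact List.getElem_set_ne hkn _
          · rfl
        rw [hsame]

lemma pvB_eq (shapeParts : List (Int × Int))
    (hnd : (shapeParts.map Prod.fst).Nodup) :
    transToShapePartListForRide_alt shapeParts =
      transToShapePartListForRide shapeParts := by
  have hB : transToShapePartListForRide_alt shapeParts
      = shapeParts.foldl pvPatch [1, 1, 1, 1, 1, 0, 0] := rfl
  have hlenB : (shapeParts.foldl pvPatch ([1, 1, 1, 1, 1, 0, 0] : List Int)).length = 7 :=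
    pvFoldl_patch_length _ _
  have hA : transToShapePartListForRide shapeParts =
      [(match shapeParts.find? (fun kv => kv.1 == (0 : Int)) with
        | some kv => kv.2 | none => 1),
       (match shapeParts.find? (fun kv => kv.1 == (1 : Int)) with
        | some kv => kv.2 | none => 1),
       (match shapeParts.find? (fun kv => kv.1 == (2 : Int)) with
        | some kv => kv.2 | none => 1),
       (match shapeParts.find? (fun kv => kv.1 == (3 : Int)) with
        | some kv => kv.2 | none => 1),
       (match shapeParts.find? (fun kv => kv.1 == (4 : Int)) with
        | some kv => kv.2 | none => 1),
       (match shapeParts.find? (fun kv => kv.1 == (5 : Int)) with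
        | some kv => kv.2 | none => 0),
       (match shapeParts.find? (fun kv => kv.1 == (6 : Int)) with
        | some kv => kv.2 | none => 0)] := rfl
  rw [hA, hB]
  apply List.ext_getElem?
  intro i
  by_cases hi : i < 7
  · rw [pvFoldl_patch_getElem shapeParts _ hnd rfl i hi]
    interval_cases i <;> rfl
  · rw [List.getElem?_eq_none (by omega), List.getElem?_eq_none (by simp; omega)]

-- ===== VERDICT (by name: the statement is the Claim_ definition above) =====
theorem transToShapePartListForRide_spec : Claim_equal_transToShapePartListForRide := by
  intro shapeParts _ hpre
  unfold Spec_transToShapePartListForRide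
  exact (pvB_eq shapeParts hpre).symm
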